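-- pv_equiv track=rewrite | github.com/Nekos-API/Nekos-API | api/images/management/commands/image_size.py | get_aspect_ratio
-- ===== SOURCE A (Python) =====
-- def get_aspect_ratio(height: int, width: int):
--     """
--     Returns the aspect ratio of an image.
--     """
--     divider = 0
--     i = height if height < width else width
--
--     while i != 0:
--         if height % i == 0 and width % i == 0:
--             divider = i
--             break
--         i -= 1
--
--     return f"{int(width / divider)}:{int(height / divider)}"
-- ===== SOURCE B (Python) =====
-- def get_aspect_ratio(height: int, width: int):
--     """
--     Returns the aspect ratio of an image.
--     """
--     divider = 0
--     if min(height, width) > 0: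
--         a, b = height, width
--         while b:
--             a, b = b, a % b
--         divider = a
--     return f"{int(width / divider)}:{int(height / divider)}"
-- ===== Notes on version B (the rewrite author's own statement) =====
-- stated objective: faster
-- what changed: Replaces the unit-step descending scan for a common divisor with a hand-written Euclidean algorithm (repeated modulo), guarded by min(height,width) > 0 so zero dimensions still raise ZeroDivisionError.
-- outside the precondition, e.g. on get_aspect_ratio(-2, -2): A returns '1:1', B raises ZeroDivisionError
import Mathlib
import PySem

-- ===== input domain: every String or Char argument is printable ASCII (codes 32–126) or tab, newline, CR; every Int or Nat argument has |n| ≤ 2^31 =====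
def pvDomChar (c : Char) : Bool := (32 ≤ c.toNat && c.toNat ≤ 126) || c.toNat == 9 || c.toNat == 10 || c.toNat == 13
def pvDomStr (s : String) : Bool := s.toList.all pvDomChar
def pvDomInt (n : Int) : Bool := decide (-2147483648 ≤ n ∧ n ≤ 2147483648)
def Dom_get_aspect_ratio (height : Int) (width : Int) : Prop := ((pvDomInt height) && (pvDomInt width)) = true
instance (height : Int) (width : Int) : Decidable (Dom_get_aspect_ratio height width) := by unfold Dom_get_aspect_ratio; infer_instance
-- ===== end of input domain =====

-- B replaces A's unit-step descending common-divisor scan with a hand-written Euclidean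
-- algorithm (objective: faster — fewer iterations by repeated modulo). Equivalence is
-- proved on positive dimensions (Pre_): elsewhere A diverges, raises ZeroDivisionError,
-- or returns a sign-accidental value while B raises.

-- ===== PORT A =====
-- A's while loop: i counts down from min(height, width); inside Pre_ that start value is
-- nonnegative, so recursion on its toNat transcribes the loop exactly.
def aScan (height : Int) (width : Int) : Nat → Int
  | 0 => 0    -- loop exits with divider still 0
  | Nat.succ n =>
      if PySem.Int.mod height (Nat.succ n : Int) = 0 ∧ PySem.Int.mod width (Nat.succ n : Int) = 0
      then (Nat.succ n : Int)    -- divider = i; break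
      else aScan height width n  -- i -= 1

def get_aspect_ratio (height : Int) (width : Int) : String :=
  let i := if height < width then height else width
  let divider := aScan height width i.toNat
  -- int(width / divider): float true division then truncation = truncdiv on this domain
  PySem.Int.toStr (PySem.Int.truncdiv width divider) ++ ":" ++ PySem.Int.toStr (PySem.Int.truncdiv height divider)

-- ===== PORT B =====
-- Source B's `while b: a, b = b, a % b`; fuel b.natAbs + 1 suffices since with b > 0 the new
-- second component a % b is nonnegative and strictly smaller than b.
def euclidB : Nat → Int → Int → Int
  | 0, a, _ => a
  | Nat.succ f, a, b => if b = 0 then a else euclidB f b (PySem.Int.mod a b)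

def get_aspect_ratio_alt (height : Int) (width : Int) : String :=
  let divider := if min height width > 0 then euclidB (width.natAbs + 1) height width else 0
  PySem.Int.toStr (PySem.Int.truncdiv width divider) ++ ":" ++ PySem.Int.toStr (PySem.Int.truncdiv height divider)

-- ===== PRECONDITION & SPEC =====
-- Pre_ excludes nonpositive dimensions: there A raises ZeroDivisionError (a zero dimension),
-- diverges (most negative pairs), or on a few negative pairs returns a sign-accidental value
-- of its descending scan, while B's guard leaves divider = 0 and raises ZeroDivisionError.
def Pre_get_aspect_ratio (height : Int) (width : Int) : Prop := 0 < height ∧ 0 < width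
instance (height : Int) (width : Int) : Decidable (Pre_get_aspect_ratio height width) := by unfold Pre_get_aspect_ratio; infer_instance
def pvWitness_get_aspect_ratio : Int × Int := (1080, 1920)

def Spec_get_aspect_ratio (height : Int) (width : Int) (out : String) : Prop := out = get_aspect_ratio_alt height width
instance (height : Int) (width : Int) (out : String) : Decidable (Spec_get_aspect_ratio height width out) := by unfold Spec_get_aspect_ratio; infer_instance

-- ===== CLAIM (what is proved, stated in full; the proofs are below) =====
def Claim_equal_get_aspect_ratio : Prop := ∀ (height : Int) (width : Int), Dom_get_aspect_ratio height width → Pre_get_aspect_ratio height width → Spec_get_aspect_ratio height width (get_aspect_ratio height width)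

-- ===== LEMMAS AND PROOFS =====

-- A's descending scan finds gcd: it returns the largest common divisor ≤ its start value.
lemma aScan_eq_gcd (height width : Int) (hh : 0 < height) :
    ∀ n : Nat, (Int.gcd height width : Int) ≤ n → aScan height width n = Int.gcd height width := by
  intro n
  induction n with
  | zero =>
      intro hle
      have : 0 < Int.gcd height width := Int.gcd_pos_of_ne_zero_left _ (by omega)
      exact absurd hle (by push_cast; omega)
  | succ n ih =>
      intro hle
      by_cases hdiv : PySem.Int.mod height (Nat.succ n : Int) = 0 ∧ PySem.Int.mod width (Nat.succ n : Int) = 0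
      · -- i divides both, so i ∣ gcd hence i ≤ gcd; with gcd ≤ i they are equal
        have hd1 : (Nat.succ n : Int) ∣ height := (PySem.Int.mod_eq_zero_iff_dvd _ _).mp hdiv.1
        have hd2 : (Nat.succ n : Int) ∣ width := (PySem.Int.mod_eq_zero_iff_dvd _ _).mp hdiv.2
        have hdg : (Nat.succ n : Int) ∣ (Int.gcd height width : Int) := by
          exact_mod_cast Int.dvd_gcd hd1 hd2
        have hgpos : 0 < Int.gcd height width := Int.gcd_pos_of_ne_zero_left _ (by omega)
        have hgpos' : (0 : Int) < (Int.gcd height width : Int) := by exact_mod_cast hgpos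
        have hle' : (Nat.succ n : Int) ≤ (Int.gcd height width : Int) :=
          Int.le_of_dvd hgpos' hdg
        simp only [aScan, if_pos hdiv]
        omega
      · -- i does not divide both, so gcd ≠ i, hence gcd ≤ n
        have hne : (Int.gcd height width : Int) ≠ (Nat.succ n : Int) := by
          intro heq
          apply hdiv
          constructor
          · exact (PySem.Int.mod_eq_zero_iff_dvd _ _).mpr (heq ▸ Int.gcd_dvd_left height width)
          · exact (PySem.Int.mod_eq_zero_iff_dvd _ _).mpr (heq ▸ Int.gcd_dvd_right height width)
        simp only [aScan, if_neg hdiv]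
        exact ih (by omega)

-- B's Euclid loop computes gcd, given fuel exceeding |b| and nonnegative arguments.
lemma euclidB_eq_gcd : ∀ (f : Nat) (a b : Int), 0 ≤ a → 0 ≤ b → b.natAbs < f →
    euclidB f a b = Int.gcd a b := by
  intro f
  induction f with
  | zero => intro a b _ _ hf; omega
  | succ f ih =>
      intro a b ha hb hf
      by_cases hb0 : b = 0
      · subst hb0
        simp only [euclidB, Int.gcd, Int.natAbs_zero, Nat.gcd_zero_right]
        exact (Int.natAbs_of_nonneg ha).symm
      · have hbpos : 0 < b := by omega
        have hmod : PySem.Int.mod a b = a % b := PySem.Int.mod_eq_emod_of_pos hbpos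
        have hmn : 0 ≤ a % b := Int.emod_nonneg a hb0
        have hml : a % b < b := Int.emod_lt_of_pos a hbpos
        have hrec : euclidB f b (a % b) = Int.gcd b (a % b) :=
          ih b (a % b) (le_of_lt hbpos) hmn (by omega)
        simp only [euclidB, if_neg hb0, hmod, hrec]
        rw [Int.gcd_comm b (a % b), Int.gcd_emod]

-- both ports compute divider = gcd on positive inputs, hence the same string
theorem get_aspect_ratio_spec : Claim_equal_get_aspect_ratio := by
  intro height width _ hpre
  obtain ⟨hh, hw⟩ := hpre
  unfold Spec_get_aspect_ratio get_aspect_ratio get_aspect_ratio_alt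
  have hga : aScan height width (if height < width then height else width).toNat
      = Int.gcd height width := by
    apply aScan_eq_gcd height width hh
    have h1 : (Int.gcd height width : Int) ≤ height := Int.gcd_le_left width hh
    have h2 : (Int.gcd height width : Int) ≤ width := Int.gcd_le_right height hw
    split <;> omega
  have hgb : (if min height width > 0 then euclidB (width.natAbs + 1) height width else 0)
      = Int.gcd height width := by
    rw [if_pos (by simp [min_def]; omega)]
    exact euclidB_eq_gcd _ height width (by omega) (by omega) (by omega)
  simp only [hga, hgb]
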